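-- pv_equiv track=rewrite | github.com/aorursy/KT_dataset_py | nagarjunaraochakka_myprojectnameentityrecognition.py | cooccurrence
-- ===== SOURCE A (Python) =====
-- from itertools import combinations
-- from collections import defaultdict
--
-- def cooccurrence(common_entities):
--
--     com = defaultdict(int)
--
--     #Build co-occurence matrix
--
--     for w1,w2 in combinations(sorted(common_entities),2):
--
--         com[w1,w2] += 1
--
--     result = defaultdict(dict)
--
--     for (w1,w2), count in com.items():
--
--         if w1 != w2:
--
--             #result[w1][w2]={'weight':count}
--
--             result[w1][w2]= count
--
--     return result
-- ===== SOURCE B (Python) =====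
-- def cooccurrence(common_entities):
--     # Run-length encode the sorted list, then combine distinct values pairwise:
--     # count(a, b) = mult(a) * mult(b), avoiding the O(n^2) pair enumeration.
--     groups = []
--     for v in sorted(common_entities):
--         if groups and groups[-1][0] == v:
--             groups[-1] = (v, groups[-1][1] + 1)
--         else:
--             groups.append((v, 1))
--     pairs = []
--     rest = []
--     for v, m in reversed(groups):
--         if rest:
--             pairs.append((v, {w: m * k for w, k in rest}))
--         rest = [(v, m)] + rest
--     return dict(reversed(pairs))
-- ===== Notes on version B (the rewrite author's own statement) =====
-- stated objective: faster
-- what changed: Instead of enumerating all O(n^2) pairs of the sorted list and counting them in a dict, B run-length encodes the sorted list once and computes each pair count as the product of the two multiplicities, iterating only over distinct-value pairs.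
import Mathlib
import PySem

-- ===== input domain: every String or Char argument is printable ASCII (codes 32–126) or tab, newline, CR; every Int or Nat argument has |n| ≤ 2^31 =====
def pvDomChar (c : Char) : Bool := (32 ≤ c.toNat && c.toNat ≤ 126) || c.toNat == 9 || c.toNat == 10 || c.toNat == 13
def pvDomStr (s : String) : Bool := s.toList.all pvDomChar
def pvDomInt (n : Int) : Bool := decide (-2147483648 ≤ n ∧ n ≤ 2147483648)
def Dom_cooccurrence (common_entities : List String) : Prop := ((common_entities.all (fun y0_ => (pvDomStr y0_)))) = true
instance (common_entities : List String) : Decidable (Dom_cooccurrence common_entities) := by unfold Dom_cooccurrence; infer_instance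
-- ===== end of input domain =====

-- B replaces A's O(n^2) enumeration of all pairs of the sorted list by a run-length
-- encoding of the sorted list combined pairwise over distinct values (counts are
-- products of multiplicities); objective: faster.

-- ===== PORT A =====
-- pairs (w1, w2) drawn by 'for w1,w2 in combinations(sorted(...), 2)'
def pvPairsOf (s : List String) : List (String × String) :=
  (PySem.List.combinations s 2).map (fun c => (c.getD 0 "", c.getD 1 ""))

def cooccurrence (common_entities : List String) : List (String × List (String × Int)) :=
  let s := PySem.List.sorted common_entities (fun x => x) false
  let com : PySem.Dict (String × String) Int :=
    (pvPairsOf s).foldl (fun d p => d.modify p 0 (· + 1)) PySem.Dict.empty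
  let result : PySem.Dict String (PySem.Dict String Int) :=
    com.items.foldl
      (fun r pc =>
        if pc.1.1 ≠ pc.1.2 then
          r.modify pc.1.1 PySem.Dict.empty (fun inner => inner.insert pc.1.2 pc.2)
        else r)
      PySem.Dict.empty
  result.items.map (fun p => (p.1, p.2.items))

-- ===== PORT B =====
-- one step of B's run-length-encoding loop over the sorted list
def pvBStep (acc : List (String × Int)) (v : String) : List (String × Int) :=
  match acc.getLast? with
  | some lastp => if lastp.1 = v then acc.dropLast ++ [(v, lastp.2 + 1)] else acc ++ [(v, 1)]
  | none => [(v, 1)]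

def cooccurrence_alt (common_entities : List String) : List (String × List (String × Int)) :=
  let groups := (PySem.List.sorted common_entities (fun x => x) false).foldl pvBStep []
  let st := groups.reverse.foldl
      (fun (st : List (String × List (String × Int)) × List (String × Int)) g =>
        ((if st.2 ≠ [] then st.1 ++ [(g.1, st.2.map (fun w => (w.1, g.2 * w.2)))] else st.1),
         g :: st.2))
      ([], [])
  st.1.reverse

-- ===== PRECONDITION & SPEC =====
def Spec_cooccurrence (common_entities : List String) (out : List (String × List (String × Int))) : Prop := out = cooccurrence_alt common_entities
instance (common_entities : List String) (out : List (String × List (String × Int))) : Decidable (Spec_cooccurrence common_entities out) := by unfold Spec_cooccurrence; infer_instance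

-- ===== CLAIM (what is proved, stated in full; the proofs are below) =====
def Claim_equal_cooccurrence : Prop := ∀ (common_entities : List String), Dom_cooccurrence common_entities → Spec_cooccurrence common_entities (cooccurrence common_entities)

-- ===== LEMMAS AND PROOFS =====

-- canonical run-length encoding of a list (groups of equal adjacent elements)
def pvGrouping : List String → List (String × Int)
  | [] => []
  | v :: t =>
    (v, (1 : Int) + (t.takeWhile (· == v)).length) :: pvGrouping (t.dropWhile (· == v))
termination_by l => l.length
decreasing_by
  simp only [List.length_cons]
  exact Nat.lt_succ_of_le (List.length_dropWhile_le _ _)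

-- the common normal form both ports compute
def pvTarget : List (String × Int) → List (String × List (String × Int))
  | [] => []
  | g :: t =>
    if t = [] then [] else (g.1, t.map (fun w => (w.1, g.2 * w.2))) :: pvTarget t

-- A's intermediate dicts, named for the proofs (definitionally the port's lets)
def pvCom (s : List String) : PySem.Dict (String × String) Int :=
  (pvPairsOf s).foldl (fun d p => d.modify p 0 (· + 1)) PySem.Dict.empty

def pvF2 (r : PySem.Dict String (PySem.Dict String Int)) (pc : (String × String) × Int) :
    PySem.Dict String (PySem.Dict String Int) :=
  if pc.1.1 ≠ pc.1.2 then
    r.modify pc.1.1 PySem.Dict.empty (fun inner => inner.insert pc.1.2 pc.2)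
  else r

def pvRes (s : List String) : PySem.Dict String (PySem.Dict String Int) :=
  (pvCom s).items.foldl pvF2 PySem.Dict.empty

def pvABody (s : List String) : List (String × List (String × Int)) :=
  (pvRes s).items.map (fun p => (p.1, p.2.items))

lemma cooccurrence_eq_pvABody (xs : List String) :
    cooccurrence xs = pvABody (PySem.List.sorted xs (fun x => x) false) := rfl

-- ---- B side ----

lemma pvB_foldr (gs : List (String × Int)) :
    gs.foldr (fun g st =>
        ((if st.2 ≠ [] then st.1 ++ [(g.1, st.2.map (fun w => (w.1, g.2 * w.2)))] else st.1),
         g :: st.2))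
      (([], []) : List (String × List (String × Int)) × List (String × Int))
    = ((pvTarget gs).reverse, gs) := by
  induction gs with
  | nil => rfl
  | cons g t ih =>
    simp only [List.foldr_cons, ih, pvTarget]
    by_cases ht : t = []
    · subst ht; rfl
    · simp [ht]

lemma pvBStep_ne_nil (acc : List (String × Int)) (v : String) : pvBStep acc v ≠ [] := by
  unfold pvBStep
  cases h : acc.getLast? with
  | none => simp
  | some lastp => simp only []; split_ifs <;> simp

lemma pvBStep_shift (a l : List (String × Int)) (v : String) (hl : l ≠ []) :
    pvBStep (a ++ l) v = a ++ pvBStep l v := by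
  unfold pvBStep
  rw [show (a ++ l).getLast? = l.getLast? from List.getLast?_append_of_ne_nil a hl]
  cases h : l.getLast? with
  | none => simp [List.getLast?_eq_none_iff] at h; exact absurd h hl
  | some lastp =>
    dsimp only
    split_ifs
    · rw [List.dropLast_append_of_ne_nil hl, List.append_assoc]
    · rw [List.append_assoc]

lemma pvFold_shift (u : List String) (a l : List (String × Int)) (hl : l ≠ []) :
    u.foldl pvBStep (a ++ l) = a ++ u.foldl pvBStep l := by
  induction u generalizing l with
  | nil => rfl
  | cons x u ih =>
    simp only [List.foldl_cons, pvBStep_shift a l x hl]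
    exact ih _ (pvBStep_ne_nil l x)

lemma pvFold_rep (v : String) (c : Int) (j : Nat) (u : List String) :
    (List.replicate j v ++ u).foldl pvBStep [(v, c)] = u.foldl pvBStep [(v, c + j)] := by
  induction j generalizing c with
  | zero => simp
  | succ j ih =>
    have hstep : pvBStep [(v, c)] v = [(v, c + 1)] := by simp [pvBStep]
    simp only [List.replicate_succ, List.cons_append, List.foldl_cons, hstep, ih]
    norm_num
    ring_nf

-- ---- sorted-list decomposition ----

lemma pv_sorted_decomp (v : String) (t : List String) (hs : (v :: t).Pairwise (· ≤ ·)) :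
    ∃ (j : Nat) (u : List String),
      t = List.replicate j v ++ u ∧ (∀ x ∈ u, v < x) ∧ u.Pairwise (· ≤ ·) ∧
      t.takeWhile (· == v) = List.replicate j v ∧ t.dropWhile (· == v) = u := by
  refine ⟨(t.takeWhile (· == v)).length, t.dropWhile (· == v), ?_, ?_, ?_, ?_, rfl⟩
  · have htw : t.takeWhile (· == v) = List.replicate (t.takeWhile (· == v)).length v := by
      apply List.eq_replicate_of_mem
      intro x hx
      have := List.mem_takeWhile_imp hx
      simpa using this
    conv_lhs => rw [← List.takeWhile_append_dropWhile (p := (· == v)) (l := t)]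
    rw [← htw]
  · have hvle : ∀ x ∈ t, v ≤ x := (List.pairwise_cons.mp hs).1
    have hsub : (t.dropWhile (· == v)).Sublist t := List.dropWhile_sublist _
    have hpt : t.Pairwise (· ≤ ·) := (List.pairwise_cons.mp hs).2
    cases hu : t.dropWhile (· == v) with
    | nil => simp
    | cons h rest =>
      have hne : t.dropWhile (· == v) ≠ [] := by rw [hu]; simp
      have hh' := List.head_dropWhile_not (· == v) hne
      have hh : h ≠ v := by
        have hhead : (t.dropWhile (· == v)).head hne = h := by simp [hu]
        rw [hhead] at hh'
        simpa using hh'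
      have hmem : ∀ x ∈ h :: rest, x ∈ t := fun x hx => (hu ▸ hsub).subset hx
      have hvh : v < h := lt_of_le_of_ne (hvle h (hmem h (by simp))) (Ne.symm hh)
      intro x hx
      rcases List.mem_cons.mp hx with rfl | hx'
      · exact hvh
      · have hpu : (h :: rest).Pairwise (· ≤ ·) := hu ▸ hpt.sublist hsub
        exact lt_of_lt_of_le hvh ((List.pairwise_cons.mp hpu).1 x hx')
  · exact ((List.pairwise_cons.mp hs).2).sublist (List.dropWhile_sublist _)
  · apply List.eq_replicate_of_mem
    intro x hx
    have := List.mem_takeWhile_imp hx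
    simpa using this

lemma pv_takeWhile_head_ne (v : String) (u : List String) (hu : ∀ x ∈ u, v < x) :
    u.takeWhile (· == v) = [] ∧ u.dropWhile (· == v) = u := by
  cases u with
  | nil => simp
  | cons h rest =>
    have : (h == v) = false := by
      simp only [beq_eq_false_iff_ne, ne_eq]
      exact fun e => absurd (hu h (by simp)) (by simp [e])
    simp [this]

lemma pvGrouping_rep (v : String) (j : Nat) (u : List String)
    (hu : ∀ x ∈ u, v < x) :
    pvGrouping (v :: (List.replicate j v ++ u)) = (v, (1 : Int) + j) :: pvGrouping u := by
  obtain ⟨h1, h2⟩ := pv_takeWhile_head_ne v u hu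
  rw [pvGrouping]
  rw [List.takeWhile_append, List.dropWhile_append]
  simp [h1, h2]

lemma pvGroups_eq (s : List String) (hs : s.Pairwise (· ≤ ·)) :
    s.foldl pvBStep [] = pvGrouping s := by
  have H : ∀ (n : Nat) (s : List String), s.length ≤ n → s.Pairwise (· ≤ ·) →
      s.foldl pvBStep [] = pvGrouping s := by
    intro n
    induction n with
    | zero =>
      intro s h _
      rw [List.length_eq_zero_iff.mp (Nat.le_zero.mp h), pvGrouping]
      rfl
    | succ n ih =>
      intro s hlen hs
      cases s with
      | nil => rw [pvGrouping]; rfl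
      | cons v t =>
        obtain ⟨j, u, ht, hu, hup, htw, hdw⟩ := pv_sorted_decomp v t hs
        subst ht
        have h1 : (v :: (List.replicate j v ++ u)).foldl pvBStep [] =
            u.foldl pvBStep [(v, (1 : Int) + j)] := by
          show (List.replicate j v ++ u).foldl pvBStep [(v, (1 : Int))] = _
          exact pvFold_rep v 1 j u
        rw [h1, pvGrouping_rep v j u hu]
        cases u with
        | nil => rw [pvGrouping]; rfl
        | cons h rest =>
          have hvh : v ≠ h := ne_of_lt (hu h (by simp))
          have h2 : pvBStep [(v, (1 : Int) + j)] h = [(v, (1 : Int) + j)] ++ [(h, 1)] := by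
            simp [pvBStep, hvh]
          have h3 : rest.foldl pvBStep ([(v, (1 : Int) + j)] ++ [(h, 1)]) =
              [(v, (1 : Int) + j)] ++ rest.foldl pvBStep [(h, 1)] :=
            pvFold_shift rest _ _ (by simp)
          have h4 : rest.foldl pvBStep [(h, (1 : Int))] = (h :: rest).foldl pvBStep [] := rfl
          have h5 : (h :: rest).foldl pvBStep [] = pvGrouping (h :: rest) := by
            apply ih _ _ hup
            have := hlen
            simp [List.length_append, List.length_replicate] at this ⊢
            omega
          simp only [List.foldl_cons, h2, h3, h4, h5]
          rfl
  exact H s.length s le_rfl hs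

lemma cooccurrence_alt_eq (xs : List String) :
    cooccurrence_alt xs = pvTarget (pvGrouping (PySem.List.sorted xs (fun x => x) false)) := by
  show ((((PySem.List.sorted xs (fun x => x) false).foldl pvBStep []).reverse.foldl
      (fun (st : List (String × List (String × Int)) × List (String × Int)) g =>
        ((if st.2 ≠ [] then st.1 ++ [(g.1, st.2.map (fun w => (w.1, g.2 * w.2)))] else st.1),
         g :: st.2)) ([], [])).1).reverse = _
  rw [pvGroups_eq _ (PySem.List.sorted_pairwise xs (fun x => x)), List.foldl_reverse,
    pvB_foldr, List.reverse_reverse]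

lemma pv_dedup_map_inj {α β : Type} [BEq α] [LawfulBEq α] [BEq β] [LawfulBEq β]
    (f : α → β) (hf : Function.Injective f) (l : List α) :
    PySem.List.dedup (l.map f) = (PySem.List.dedup l).map f := by
  simp only [PySem.List.dedup_eq_ofList]
  induction l with
  | nil => rfl
  | cons x xs ih =>
    rw [List.map_cons, PySem.Set.ofList_cons, PySem.Set.ofList_cons, ih]
    simp only [PySem.Set.discard, List.map_cons, List.cons.injEq, true_and]
    rw [List.filter_map]
    congr 1
    apply List.filter_congr
    intro y _
    simp [Function.comp, hf.eq_iff]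

lemma pv_ofList_rep_discard {α : Type} [BEq α] [LawfulBEq α] (v : α) (u : List α)
    (hvu : v ∉ u) (k : Nat) :
    (PySem.Set.ofList (List.replicate k v ++ u)).discard v = PySem.Set.ofList u := by
  induction k with
  | zero =>
    simp only [List.replicate_zero, List.nil_append, PySem.Set.discard]
    apply List.filter_eq_self.mpr
    intro y hy
    have : y ∈ u := (PySem.Set.mem_ofList u y).mp hy
    simp only [Bool.not_eq_eq_eq_not, Bool.not_true, beq_eq_false_iff_ne, ne_eq]
    exact fun e => hvu (e ▸ this)
  | succ k ih =>
    rw [List.replicate_succ, List.cons_append, PySem.Set.ofList_cons]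
    simp only [PySem.Set.discard] at ih ⊢
    rw [List.filter_cons_of_neg (by simp), List.filter_filter]
    rw [show (fun y => !y == v && !y == v) = (fun y => !y == v) from by funext y; simp [Bool.and_self]]
    exact ih

lemma pv_dedup_rep_append {α : Type} [BEq α] [LawfulBEq α] (v : α) (m : Nat) (u : List α)
    (hm : 1 ≤ m) (hvu : v ∉ u) :
    PySem.List.dedup (List.replicate m v ++ u) = v :: PySem.List.dedup u := by
  obtain ⟨k, rfl⟩ : ∃ k, m = k + 1 := ⟨m - 1, by omega⟩
  simp only [PySem.List.dedup_eq_ofList]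
  rw [List.replicate_succ, List.cons_append, PySem.Set.ofList_cons,
    pv_ofList_rep_discard v u hvu k]

lemma pvGrouping_eq_dedup (u : List String) (hu : u.Pairwise (· ≤ ·)) :
    pvGrouping u = (PySem.List.dedup u).map (fun d => (d, (u.count d : Int))) := by
  have H : ∀ (n : Nat) (u : List String), u.length ≤ n → u.Pairwise (· ≤ ·) →
      pvGrouping u = (PySem.List.dedup u).map (fun d => (d, (u.count d : Int))) := by
    intro n
    induction n with
    | zero =>
      intro u h _
      rw [List.length_eq_zero_iff.mp (Nat.le_zero.mp h), pvGrouping]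
      rfl
    | succ n ih =>
      intro u hlen hs
      cases u with
      | nil => rw [pvGrouping]; rfl
      | cons v t =>
        obtain ⟨j, u', ht, hu', hup, htw, hdw⟩ := pv_sorted_decomp v t hs
        subst ht
        have hvnotin : v ∉ u' := fun hin => lt_irrefl v (hu' v hin)
        have hded : PySem.List.dedup (v :: (List.replicate j v ++ u')) =
            v :: PySem.List.dedup u' := by
          rw [show v :: (List.replicate j v ++ u') = List.replicate (j + 1) v ++ u' from by
            rw [List.replicate_succ, List.cons_append]]
          exact pv_dedup_rep_append v (j + 1) u' (by omega) hvnotin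
        rw [pvGrouping_rep v j u' hu', hded, List.map_cons]
        have hcv : ((v :: (List.replicate j v ++ u')).count v : Int) = (1 : Int) + j := by
          rw [show v :: (List.replicate j v ++ u') = List.replicate (j + 1) v ++ u' from by
            rw [List.replicate_succ, List.cons_append]]
          rw [List.count_append, List.count_replicate, List.count_eq_zero.mpr hvnotin]
          simp
          omega
        rw [ih u' (by simp at hlen ⊢; omega) hup]
        congr 1
        · rw [hcv]
        · apply List.map_congr_left
          intro d hd
          have hdu : d ∈ u' := (PySem.List.mem_dedup u' d).mp hd
          have hdv : d ≠ v := fun e => hvnotin (e ▸ hdu)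
          congr 1
          rw [show v :: (List.replicate j v ++ u') = List.replicate (j + 1) v ++ u' from by
            rw [List.replicate_succ, List.cons_append]]
          rw [List.count_append, List.count_replicate, if_neg (by simpa using fun e => hdv e.symm)]
          simp
  exact H u.length u le_rfl hu

-- ---- A side: pairs ----

lemma pvPairsOf_cons (v : String) (t : List String) :
    pvPairsOf (v :: t) = t.map (fun y => (v, y)) ++ pvPairsOf t := by
  unfold pvPairsOf
  rw [show (2 : Nat) = 1 + 1 from rfl, PySem.List.combinations_cons_succ,
    PySem.List.combinations_one]
  simp [List.map_map, Function.comp]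

lemma pvPairsOf_mem (s : List String) (p : String × String) (hp : p ∈ pvPairsOf s) :
    p.1 ∈ s ∧ p.2 ∈ s := by
  unfold pvPairsOf at hp
  obtain ⟨c, hc, rfl⟩ := List.mem_map.mp hp
  obtain ⟨hsub, hlen⟩ := (PySem.List.mem_combinations_iff s 2 c).mp hc
  match c, hlen with
  | [a, b], _ =>
    have ha : a ∈ s := hsub.subset (by simp)
    have hb : b ∈ s := hsub.subset (by simp)
    exact ⟨ha, hb⟩

lemma pvPairs_count_v (v : String) (m : Nat) (u : List String) (d : String) (hd : d ≠ v)
    (hvu : v ∉ u) :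
    (pvPairsOf (List.replicate m v ++ u)).count (v, d) = m * u.count d := by
  have hinj : Function.Injective (fun y => ((v, y) : String × String)) :=
    fun a b h => by simpa using h
  induction m with
  | zero =>
    simp only [List.replicate_zero, List.nil_append, Nat.zero_mul]
    apply List.count_eq_zero.mpr
    intro hmem
    exact hvu (pvPairsOf_mem u (v, d) hmem).1
  | succ m ih =>
    rw [List.replicate_succ, List.cons_append, pvPairsOf_cons, List.count_append, ih]
    have h1 : ((List.replicate m v ++ u).map (fun y => (v, y))).count (v, d) =
        (List.replicate m v ++ u).count d := List.count_map_of_injective _ _ hinj d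
    rw [h1, List.count_append, List.count_replicate,
      if_neg (by simpa using fun e => hd e.symm)]
    ring

lemma pvPairs_count_other (v : String) (m : Nat) (u : List String) (p : String × String)
    (hp : p.1 ≠ v) :
    (pvPairsOf (List.replicate m v ++ u)).count p = (pvPairsOf u).count p := by
  induction m with
  | zero => simp
  | succ m ih =>
    rw [List.replicate_succ, List.cons_append, pvPairsOf_cons, List.count_append, ih]
    have : ((List.replicate m v ++ u).map (fun y => (v, y))).count p = 0 := by
      apply List.count_eq_zero.mpr
      intro hmem
      obtain ⟨y, _, hy⟩ := List.mem_map.mp hmem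
      exact hp (by rw [← hy])
    omega

lemma pv_dedup_append {α : Type} [BEq α] [LawfulBEq α] (l1 l2 : List α) :
    PySem.List.dedup (l1 ++ l2) =
      PySem.List.dedup l1 ++
        (PySem.List.dedup l2).filter (fun y => !PySem.Set.contains (PySem.List.dedup l1) y) := by
  simp only [PySem.List.dedup_eq_ofList, PySem.Set.ofList_append,
    PySem.Set.update_eq_append_filter]

lemma pvPairs_dedup (v : String) (m : Nat) (u : List String) (hm : 1 ≤ m) (hvu : v ∉ u) :
    PySem.List.dedup (pvPairsOf (List.replicate m v ++ u)) =
      (if 2 ≤ m then [(v, v)] else []) ++ (PySem.List.dedup u).map (fun d => (v, d)) ++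
        PySem.List.dedup (pvPairsOf u) := by
  have hinj : Function.Injective (fun y : String => ((v, y) : String × String)) :=
    fun a b h => by simpa using h
  have hcont : ∀ (l : List (String × String)) (y : String × String),
      PySem.Set.contains l y = true ↔ y ∈ l := by
    intro l y
    simp [PySem.Set.contains]
  have hkeep : ∀ (block : List (String × String)), (∀ q ∈ block, q.1 = v) →
      (PySem.List.dedup (pvPairsOf u)).filter (fun y => !PySem.Set.contains block y) =
        PySem.List.dedup (pvPairsOf u) := by
    intro block hb
    apply List.filter_eq_self.mpr
    intro y hy
    have hyu : y.1 ∈ u := (pvPairsOf_mem u y ((PySem.List.mem_dedup _ y).mp hy)).1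
    have : y ∉ block := fun hmem => hvu ((hb y hmem) ▸ hyu)
    simp [this]
  obtain ⟨k, rfl⟩ : ∃ k, m = k + 1 := ⟨m - 1, by omega⟩
  clear hm
  induction k with
  | zero =>
    rw [show List.replicate 1 v ++ u = v :: u from by simp, pvPairsOf_cons, pv_dedup_append,
      pv_dedup_map_inj _ hinj, hkeep _ (fun q hq => by
        obtain ⟨d, _, he⟩ := List.mem_map.mp hq
        rw [← he])]
    simp
  | succ k ih =>
    rw [show List.replicate (k + 1 + 1) v ++ u = v :: (List.replicate (k + 1) v ++ u) from by
      rw [List.replicate_succ, List.cons_append], pvPairsOf_cons, pv_dedup_append, ih]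
    have hb0 : PySem.List.dedup ((List.replicate (k + 1) v ++ u).map (fun y => (v, y))) =
        (v, v) :: (PySem.List.dedup u).map (fun y => (v, y)) := by
      rw [List.map_append, List.map_replicate, pv_dedup_rep_append (v, v) (k + 1)
        (u.map (fun y => (v, y))) (by omega) (fun hmem => by
          obtain ⟨d, hd, he⟩ := List.mem_map.mp hmem
          exact hvu ((show d = v from by simpa using he) ▸ hd)),
        pv_dedup_map_inj _ hinj]
    rw [hb0]
    rw [List.filter_append, List.filter_append]
    have hseg1 : ((if 2 ≤ k + 1 then [(v, v)] else []) : List (String × String)).filter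
        (fun y => !PySem.Set.contains ((v, v) :: (PySem.List.dedup u).map (fun y => (v, y))) y)
          = [] := by
      split_ifs <;> simp
    have hseg2 : ((PySem.List.dedup u).map (fun d => (v, d))).filter
        (fun y => !PySem.Set.contains ((v, v) :: (PySem.List.dedup u).map (fun y => (v, y))) y)
          = [] := by
      apply List.filter_eq_nil_iff.mpr
      intro q hq
      simp only [Bool.not_eq_true', Bool.not_eq_false]
      exact (hcont _ q).mpr (List.mem_cons.mpr (Or.inr hq))
    have hseg3 := hkeep ((v, v) :: (PySem.List.dedup u).map (fun y => (v, y)))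
      (fun q hq => by
        rcases List.mem_cons.mp hq with rfl | hq'
        · rfl
        · obtain ⟨d, _, he⟩ := List.mem_map.mp hq'
          rw [← he])
    rw [hseg1, hseg2, hseg3]
    simp [show (2 : Nat) ≤ k + 1 + 1 from by omega]

-- ---- A side: dict folds ----

lemma pvCom_items (s : List String) :
    (pvCom s).items =
      (PySem.List.dedup (pvPairsOf s)).map (fun p => (p, ((pvPairsOf s).count p : Int))) := by
  rw [show pvCom s = PySem.Dict.counter (pvPairsOf s) from rfl, PySem.Dict.items_counter]
  rw [PySem.List.dedup_eq_ofList]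

lemma pv_modify_append_fresh (D E : PySem.Dict String (PySem.Dict String Int)) (k : String)
    (d0 : PySem.Dict String Int) (f : PySem.Dict String Int → PySem.Dict String Int)
    (hk : ∀ q ∈ D.items, k ≠ q.1) :
    (PySem.Dict.mk (D.items ++ E.items)).modify k d0 f =
      PySem.Dict.mk (D.items ++ (E.modify k d0 f).items) := by
  have hfind : List.find? (fun p => p.1 == k) D.items = none := by
    apply List.find?_eq_none.mpr
    intro q hq
    simpa using fun e => (hk q hq) e.symm
  have hany : (D.items.any fun p => p.1 == k) = false := by
    simp only [List.any_eq_false]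
    intro q hq
    simpa using fun e => (hk q hq) e.symm
  simp only [PySem.Dict.modify, PySem.Dict.getD, PySem.Dict.get?, PySem.Dict.insert,
    PySem.Dict.contains, List.find?_append, hfind, Option.none_or,
    List.any_append, hany, Bool.false_or]
  by_cases hE : (E.items.any fun p => p.1 == k) = true
  · simp only [hE, if_true, List.map_append]
    have hD : ∀ (val : PySem.Dict String Int),
        List.map (fun p => if (p.1 == k) = true then (k, val) else p) D.items = D.items := by
      intro val
      conv_rhs => rw [← List.map_id D.items]
      apply List.map_congr_left
      intro q hq
      rw [if_neg (by simpa using fun e => (hk q hq) e.symm)]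
      rfl
    rw [hD]
  · simp only [hE, if_false, Bool.false_eq_true, List.append_assoc]

lemma pvF2_fold_fresh (l : List ((String × String) × Int))
    (D E : PySem.Dict String (PySem.Dict String Int))
    (h : ∀ pc ∈ l, ∀ q ∈ D.items, pc.1.1 ≠ q.1) :
    l.foldl pvF2 (PySem.Dict.mk (D.items ++ E.items)) =
      PySem.Dict.mk (D.items ++ (l.foldl pvF2 E).items) := by
  induction l generalizing E with
  | nil => rfl
  | cons pc l ih =>
    have hstep : pvF2 (PySem.Dict.mk (D.items ++ E.items)) pc =
        PySem.Dict.mk (D.items ++ (pvF2 E pc).items) := by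
      by_cases hne : pc.1.1 ≠ pc.1.2
      · simp only [pvF2, if_pos hne]
        exact pv_modify_append_fresh D E pc.1.1 _ _ (h pc (by simp))
      · simp only [pvF2, if_neg hne]
    rw [List.foldl_cons, hstep, List.foldl_cons, ih _ (fun pc' h' => h pc' (by simp [h']))]

lemma pvF2_fold_same_key (v : String) (l : List (String × Int)) (inner : PySem.Dict String Int)
    (hl : ∀ w ∈ l, w.1 ≠ v) :
    (l.map (fun w => ((v, w.1), w.2))).foldl pvF2 (PySem.Dict.mk [(v, inner)]) =
      PySem.Dict.mk [(v, l.foldl (fun d w => d.insert w.1 w.2) inner)] := by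
  induction l generalizing inner with
  | nil => rfl
  | cons w l ih =>
    have hvw : v ≠ w.1 := fun e => (hl w (by simp)) (e.symm)
    have hstep : pvF2 (PySem.Dict.mk [(v, inner)]) ((v, w.1), w.2) =
        PySem.Dict.mk [(v, inner.insert w.1 w.2)] := by
      have hfind : List.find? (fun p => p.1 == v) [(v, inner)] = some (v, inner) :=
        List.find?_cons_of_pos (by simp)
      simp only [pvF2, hvw, PySem.Dict.modify, PySem.Dict.insert, PySem.Dict.getD,
        PySem.Dict.get?, PySem.Dict.contains, ne_eq, not_false_eq_true, ite_true]
      rw [hfind]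
      simp
    rw [List.map_cons, List.foldl_cons, hstep, ih _ (fun w' h' => hl w' (by simp [h'])),
      List.foldl_cons]

lemma pv_inner_items (l : List (String × Int)) (hl : (l.map Prod.fst).Nodup) :
    (l.foldl (fun (d : PySem.Dict String Int) w => d.insert w.1 w.2) PySem.Dict.empty).items
      = l := by
  have H : ∀ (l : List (String × Int)) (d : PySem.Dict String Int),
      (l.map Prod.fst).Nodup → (∀ w ∈ l, d.contains w.1 = false) →
      (l.foldl (fun d w => d.insert w.1 w.2) d).items = d.items ++ l := by
    intro l
    induction l with
    | nil => intro d _ _; simp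
    | cons w l ih =>
      intro d hnd hf
      rw [List.foldl_cons, ih _ (by simpa using hnd.of_cons)
        (fun w' hw' => ?_), PySem.Dict.items_insert_of_not_contains _ _ (hf w (by simp))]
      · simp
      · rw [PySem.Dict.contains_insert]
        have hne : w'.1 ≠ w.1 := by
          simp only [List.map_cons, List.nodup_cons] at hnd
          exact fun e => hnd.1 (e ▸ List.mem_map_of_mem hw')
        simp [hne, hf w' (by simp [hw'])]
  rw [H l PySem.Dict.empty hl (fun w _ => PySem.Dict.contains_empty w.1)]
  rfl

lemma pvF2_empty_entry (v d0 : String) (c0 : Int) (h : v ≠ d0) :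
    pvF2 PySem.Dict.empty ((v, d0), c0) =
      PySem.Dict.mk [(v, PySem.Dict.empty.insert d0 c0)] := by
  simp [pvF2, h, PySem.Dict.modify, PySem.Dict.insert, PySem.Dict.getD, PySem.Dict.get?,
    PySem.Dict.contains, PySem.Dict.empty]

-- ---- main A lemma ----

lemma pvABody_eq (s : List String) (hs : s.Pairwise (· ≤ ·)) :
    pvABody s = pvTarget (pvGrouping s) := by
  have H : ∀ (n : Nat) (s : List String), s.length ≤ n → s.Pairwise (· ≤ ·) →
      pvABody s = pvTarget (pvGrouping s) := by
    intro n
    induction n with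
    | zero =>
      intro s h _
      rw [List.length_eq_zero_iff.mp (Nat.le_zero.mp h), pvGrouping]
      rfl
    | succ n ih =>
      intro s hlen hs
      cases s with
      | nil => rw [pvGrouping]; rfl
      | cons v t =>
        obtain ⟨j, u, ht, hu, hup, htw, hdw⟩ := pv_sorted_decomp v t hs
        subst ht
        have hvnotin : v ∉ u := fun hin => lt_irrefl v (hu v hin)
        have hrep : v :: (List.replicate j v ++ u) = List.replicate (j + 1) v ++ u := by
          rw [List.replicate_succ, List.cons_append]
        -- the items list of A's first dict, in three segments
        have hitems : (pvCom (v :: (List.replicate j v ++ u))).items =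
            (if 2 ≤ j + 1 then
              [((v, v), ((pvPairsOf (List.replicate (j + 1) v ++ u)).count (v, v) : Int))]
             else []) ++
            (PySem.List.dedup u).map (fun d => ((v, d), (((j + 1) * u.count d : Nat) : Int))) ++
            (pvCom u).items := by
          rw [show pvCom (v :: (List.replicate j v ++ u)) =
              pvCom (List.replicate (j + 1) v ++ u) from by rw [hrep]]
          rw [pvCom_items, pvPairs_dedup v (j + 1) u (by omega) hvnotin,
            List.map_append, List.map_append]
          congr 1
          · congr 1
            · split_ifs <;> rfl
            · rw [List.map_map]
              apply List.map_congr_left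
              intro d hd
              have hdu : d ∈ u := (PySem.List.mem_dedup u d).mp hd
              have hdv : d ≠ v := fun e => hvnotin (e ▸ hdu)
              simp only [Function.comp_apply, Prod.mk.injEq, true_and]
              rw [pvPairs_count_v v (j + 1) u d hdv hvnotin]
          · rw [pvCom_items]
            apply List.map_congr_left
            intro p hp
            have hpu : p.1 ∈ u := (pvPairsOf_mem u p ((PySem.List.mem_dedup _ p).mp hp)).1
            have hpv : p.1 ≠ v := fun e => hvnotin (e ▸ hpu)
            simp only [Prod.mk.injEq, true_and]
            rw [pvPairs_count_other v (j + 1) u p hpv]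
        have hst1 : ((if 2 ≤ j + 1 then
            [((v, v), ((pvPairsOf (List.replicate (j + 1) v ++ u)).count (v, v) : Int))]
           else []) : List ((String × String) × Int)).foldl pvF2 PySem.Dict.empty =
            PySem.Dict.empty := by
          split_ifs <;> simp [pvF2]
        have hlenu : u.length ≤ n := by
          simp only [List.length_cons, List.length_append, List.length_replicate] at hlen
          omega
        cases u with
        | nil =>
          have hres : pvRes (v :: (List.replicate j v ++ [])) = PySem.Dict.empty := by
            unfold pvRes
            rw [hitems, List.foldl_append, List.foldl_append, hst1]
            rfl
          rw [show pvABody (v :: (List.replicate j v ++ [])) =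
              (pvRes (v :: (List.replicate j v ++ []))).items.map
                (fun p => (p.1, p.2.items)) from rfl, hres]
          rw [pvGrouping_rep v j [] hu, pvGrouping]
          rfl
        | cons u0 u' =>
          have hvu0 : v ≠ u0 := ne_of_lt (hu u0 (by simp))
          obtain ⟨rest, hrest⟩ : ∃ r, PySem.List.dedup (u0 :: u') = u0 :: r := by
            refine ⟨(PySem.Set.ofList u').discard u0, ?_⟩
            simp only [PySem.List.dedup_eq_ofList, PySem.Set.ofList_cons]
          have hrest_mem : ∀ d ∈ rest, d ∈ u0 :: u' := by
            intro d hd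
            exact (PySem.List.mem_dedup _ d).mp (hrest ▸ List.mem_cons_of_mem u0 hd)
          -- stage 2: the (v, d) entries build a single-key dict
          have hst2 : ((PySem.List.dedup (u0 :: u')).map
              (fun d => ((v, d), (((j + 1) * (u0 :: u').count d : Nat) : Int)))).foldl pvF2
                PySem.Dict.empty =
              PySem.Dict.mk [(v, ((PySem.List.dedup (u0 :: u')).map
                (fun d => (d, (((j + 1) * (u0 :: u').count d : Nat) : Int)))).foldl
                  (fun d w => d.insert w.1 w.2) PySem.Dict.empty)] := by
            rw [hrest]
            rw [List.map_cons, List.map_cons, List.foldl_cons, List.foldl_cons,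
              pvF2_empty_entry v u0 _ hvu0]
            rw [show (rest.map
                (fun d => (((v, d), (((j + 1) * (u0 :: u').count d : Nat) : Int))))) =
              ((rest.map (fun d => (d, (((j + 1) * (u0 :: u').count d : Nat) : Int)))).map
                (fun w => ((v, w.1), w.2))) from by
              rw [List.map_map]
              exact List.map_congr_left (fun d _ => rfl)]
            rw [pvF2_fold_same_key v _ _ (fun w hw => by
              obtain ⟨d, hd, he⟩ := List.mem_map.mp hw
              have : d ≠ v := fun e =>
                hvnotin (e ▸ (hrest_mem d hd))
              rw [← he]
              exact this)]
          -- stage 3: the remaining entries never touch key v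
          have hst3 := pvF2_fold_fresh (pvCom (u0 :: u')).items
            (PySem.Dict.mk [(v, ((PySem.List.dedup (u0 :: u')).map
              (fun d => (d, (((j + 1) * (u0 :: u').count d : Nat) : Int)))).foldl
                (fun d w => d.insert w.1 w.2) PySem.Dict.empty)])
            PySem.Dict.empty
            (by
              intro pc hpc q hq
              rw [pvCom_items] at hpc
              obtain ⟨p, hp, he⟩ := List.mem_map.mp hpc
              have hpu : p.1 ∈ u0 :: u' :=
                (pvPairsOf_mem _ p ((PySem.List.mem_dedup _ p).mp hp)).1
              have : pc.1.1 = p.1 := by rw [← he]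
              rw [this]
              have hqv : q.1 = v := by
                simp only [List.mem_singleton] at hq
                rw [hq]
              rw [hqv]
              exact fun e => hvnotin (e ▸ hpu))
          have hres : pvRes (v :: (List.replicate j v ++ u0 :: u')) =
              PySem.Dict.mk ((v, ((PySem.List.dedup (u0 :: u')).map
                (fun d => (d, (((j + 1) * (u0 :: u').count d : Nat) : Int)))).foldl
                  (fun d w => d.insert w.1 w.2) PySem.Dict.empty) ::
                (pvRes (u0 :: u')).items) := by
            unfold pvRes
            rw [hitems, List.foldl_append, List.foldl_append, hst1, hst2]
            rw [show (PySem.Dict.mk [(v, ((PySem.List.dedup (u0 :: u')).map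
                (fun d => (d, (((j + 1) * (u0 :: u').count d : Nat) : Int)))).foldl
                  (fun d w => d.insert w.1 w.2) PySem.Dict.empty)] :
                PySem.Dict String (PySem.Dict String Int)) =
              PySem.Dict.mk ((PySem.Dict.mk [(v, ((PySem.List.dedup (u0 :: u')).map
                (fun d => (d, (((j + 1) * (u0 :: u').count d : Nat) : Int)))).foldl
                  (fun d w => d.insert w.1 w.2) PySem.Dict.empty)] :
                PySem.Dict String (PySem.Dict String Int)).items ++
                (PySem.Dict.empty : PySem.Dict String (PySem.Dict String Int)).items) from by
              rfl]
            rw [hst3]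
            rfl
          have hinner : (((PySem.List.dedup (u0 :: u')).map
              (fun d => (d, (((j + 1) * (u0 :: u').count d : Nat) : Int)))).foldl
                (fun (d : PySem.Dict String Int) w => d.insert w.1 w.2)
                  PySem.Dict.empty).items =
              (PySem.List.dedup (u0 :: u')).map
                (fun d => (d, (((j + 1) * (u0 :: u').count d : Nat) : Int))) := by
            apply pv_inner_items
            rw [List.map_map, show (Prod.fst ∘ fun d : String =>
                (d, (((j + 1) * (u0 :: u').count d : Nat) : Int))) = fun d => d from
              funext (fun _ => rfl), List.map_id']
            exact PySem.List.nodup_dedup (u0 :: u')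
          have hbody : pvABody (v :: (List.replicate j v ++ u0 :: u')) =
              (v, (PySem.List.dedup (u0 :: u')).map
                (fun d => (d, (((j + 1) * (u0 :: u').count d : Nat) : Int)))) ::
                pvABody (u0 :: u') := by
            unfold pvABody
            rw [hres]
            simp only [List.map_cons, hinner]
          rw [hbody, pvGrouping_rep v j (u0 :: u') hu,
            pvGrouping_eq_dedup (u0 :: u') hup, hrest]
          rw [pvTarget]
          rw [if_neg (by simp)]
          rw [← hrest, ← pvGrouping_eq_dedup (u0 :: u') hup,
            ← ih (u0 :: u') hlenu hup]
          congr 1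
          rw [pvGrouping_eq_dedup (u0 :: u') hup, List.map_map]
          simp only [Prod.mk.injEq, true_and]
          apply List.map_congr_left
          intro d _
          simp only [Function.comp_apply, Prod.mk.injEq, true_and]
          push_cast
          ring
  exact H s.length s le_rfl hs

-- ===== VERDICT (by name: the statement is the Claim_ definition above) =====
theorem cooccurrence_spec : Claim_equal_cooccurrence := by
  intro xs _
  show cooccurrence xs = cooccurrence_alt xs
  rw [cooccurrence_eq_pvABody, cooccurrence_alt_eq,
    pvABody_eq _ (PySem.List.sorted_pairwise xs (fun x => x))]
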